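-- pv_equiv track=rewrite | github.com/sandrorezendemg-rgb/radar-app | radar_engine.py | filter_by_narrative
-- ===== SOURCE A (Python) =====
-- NARRATIVAS = {
--     "AI": ["RNDR", "FET", "AGIX", "OCEAN"],
--     "DeFi": ["UNI", "AAVE", "COMP", "SNX"],
--     "RWA": ["ONDO", "POLYX"],
--     "Gaming": ["IMX", "GALA", "AXS"]
-- }
--
-- def filter_by_narrative(symbols, narratives):
--
--     selected = []
--
--     for sym in symbols:
--         base = sym.replace("USDT", "")
--
--         for n in narratives:
--             if base in NARRATIVAS.get(n, []):
--                 selected.append(sym)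
--
--     return list(set(selected))
-- ===== SOURCE B (Python) =====
-- NARRATIVAS = {
--     "AI": ["RNDR", "FET", "AGIX", "OCEAN"],
--     "DeFi": ["UNI", "AAVE", "COMP", "SNX"],
--     "RWA": ["ONDO", "POLYX"],
--     "Gaming": ["IMX", "GALA", "AXS"]
-- }
--
-- def filter_by_narrative(symbols, narratives):
--     # Build, once, the set of bases belonging to the requested narratives,
--     # then select symbols in a single pass with an O(1) set-membership test.
--     wanted = set()
--     for n in narratives:
--         wanted.update(NARRATIVAS.get(n, []))
--     selected = [sym for sym in symbols if sym.replace("USDT", "") in wanted]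
--     return list(set(selected))
-- ===== Notes on version B (the rewrite author's own statement) =====
-- stated objective: faster
-- what changed: B precomputes the union set of all bases of the requested narratives once, then selects symbols in a single pass with a set-membership test, replacing A's per-symbol inner scan over narratives with list membership.
import Mathlib
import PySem

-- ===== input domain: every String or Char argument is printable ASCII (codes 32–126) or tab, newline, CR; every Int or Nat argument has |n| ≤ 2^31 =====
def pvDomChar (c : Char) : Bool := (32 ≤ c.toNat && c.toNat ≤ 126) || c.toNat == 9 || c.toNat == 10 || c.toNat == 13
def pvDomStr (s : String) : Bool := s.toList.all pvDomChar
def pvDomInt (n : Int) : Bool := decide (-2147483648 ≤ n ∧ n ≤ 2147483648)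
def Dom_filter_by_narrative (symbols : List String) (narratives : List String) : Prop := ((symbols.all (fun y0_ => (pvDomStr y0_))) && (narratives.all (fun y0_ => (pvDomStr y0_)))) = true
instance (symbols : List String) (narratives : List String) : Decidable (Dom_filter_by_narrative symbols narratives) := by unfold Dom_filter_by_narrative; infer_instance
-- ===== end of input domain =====

-- B builds the union set of wanted narrative bases once and then selects symbols in a
-- single membership-test pass, instead of A's inner scan over narratives per symbol.
-- The result is list(set(...)), so only its set of elements is meaningful.

-- ===== PORT A =====
-- module constant NARRATIVAS (shared context of both implementations)
def pvNARRATIVAS : PySem.Dict String (List String) :=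
  PySem.Dict.ofList
  [("AI", ["RNDR", "FET", "AGIX", "OCEAN"]),
   ("DeFi", ["UNI", "AAVE", "COMP", "SNX"]),
   ("RWA", ["ONDO", "POLYX"]),
   ("Gaming", ["IMX", "GALA", "AXS"])]

def filter_by_narrative (symbols : List String) (narratives : List String) : List String :=
  let selected : List String :=
    symbols.foldl (fun acc sym =>
      let base := PySem.Str.replace sym "USDT" ""
      narratives.foldl (fun acc2 n =>
        if (pvNARRATIVAS.getD n []).contains base then acc2 ++ [sym] else acc2) acc) []
  PySem.Set.ofList selected

-- ===== PORT B =====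
def filter_by_narrative_alt (symbols : List String) (narratives : List String) : List String :=
  let wanted : PySem.Set String :=
    narratives.foldl (fun s n => PySem.Set.update s (pvNARRATIVAS.getD n [])) PySem.Set.empty
  let selected : List String :=
    symbols.filter (fun sym => PySem.Set.contains wanted (PySem.Str.replace sym "USDT" ""))
  PySem.Set.ofList selected

-- ===== PRECONDITION & SPEC =====
def Spec_filter_by_narrative (symbols : List String) (narratives : List String) (out : List String) : Prop := out = filter_by_narrative_alt symbols narratives
instance (symbols : List String) (narratives : List String) (out : List String) : Decidable (Spec_filter_by_narrative symbols narratives out) := by unfold Spec_filter_by_narrative; infer_instance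

-- ===== CLAIM (what is proved, stated in full; the proofs are below) =====
def Claim_equal_filter_by_narrative : Prop := ∀ (symbols : List String) (narratives : List String), Dom_filter_by_narrative symbols narratives → Spec_filter_by_narrative symbols narratives (filter_by_narrative symbols narratives)

-- ===== LEMMAS AND PROOFS =====

-- Set.add is idempotent on an element already present.
theorem pv_add_mem {s : PySem.Set String} {x : String} (h : x ∈ s) :
    PySem.Set.add s x = s := by
  have hc : s.contains x = true := (PySem.Set.contains_iff s x).mpr h
  simp only [PySem.Set.add, hc, if_true]

-- Folding Set.add over a list all of whose elements are sym: one add if nonempty.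
theorem pv_foldl_add_const (sym : String) :
    ∀ (k : List String), (∀ y ∈ k, y = sym) →
      ∀ s : PySem.Set String,
        k.foldl PySem.Set.add s = if k = [] then s else PySem.Set.add s sym := by
  intro k
  induction k with
  | nil => intro _ s; simp
  | cons y t ih =>
    intro h s
    have hy : y = sym := h y (List.mem_cons_self)
    have ht : ∀ z ∈ t, z = sym := fun z hz => h z (List.mem_cons_of_mem _ hz)
    subst hy
    simp only [List.foldl_cons, ih ht]
    by_cases hte : t = []
    · simp [hte]
    · rw [if_neg hte, if_neg (List.cons_ne_nil y t),
        pv_add_mem (x := y) (s := PySem.Set.add s y) (by simp [PySem.Set.mem_add])]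

-- Membership in the folded union of narrative bases.
theorem pv_mem_wanted (b : String) (narratives : List String) :
    ∀ s : PySem.Set String,
      (b ∈ narratives.foldl (fun s n => PySem.Set.update s (pvNARRATIVAS.getD n [])) s ↔
        b ∈ s ∨ ∃ n ∈ narratives, b ∈ pvNARRATIVAS.getD n []) := by
  induction narratives with
  | nil => intro s; simp
  | cons n t ih =>
    intro s
    simp only [List.foldl_cons, ih, PySem.Set.mem_update, List.mem_cons]
    constructor
    · rintro ((h | h) | ⟨m, hm, hb⟩)
      · exact Or.inl h
      · exact Or.inr ⟨n, Or.inl rfl, h⟩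
      · exact Or.inr ⟨m, Or.inr hm, hb⟩
    · rintro (h | ⟨m, (rfl | hm), hb⟩)
      · exact Or.inl (Or.inl h)
      · exact Or.inl (Or.inr hb)
      · exact Or.inr ⟨m, hm, hb⟩

-- The core equality: flattening A's per-symbol repeats into the Set accumulator
-- equals folding the filtered symbol list, whenever g sym is a (possibly empty)
-- run of copies of sym, nonempty exactly when p sym holds.
theorem pv_main (p : String → Bool) (g : String → List String)
    (hconst : ∀ sym, ∀ y ∈ g sym, y = sym)
    (hne : ∀ sym, (g sym ≠ [] ↔ p sym = true)) :
    ∀ (l : List String) (s : PySem.Set String),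
      (l.flatMap g).foldl PySem.Set.add s = (l.filter p).foldl PySem.Set.add s := by
  intro l
  induction l with
  | nil => intro s; simp
  | cons sym t ih =>
    intro s
    have hrun := pv_foldl_add_const sym (g sym) (hconst sym) s
    by_cases hp : p sym = true
    · have hgn : g sym ≠ [] := (hne sym).mpr hp
      simp only [List.flatMap_cons, List.foldl_append, List.filter_cons, hp, if_pos,
        List.foldl_cons, hrun, if_neg hgn]
      exact ih _
    · have hg0 : g sym = [] := by
        by_contra h
        exact hp ((hne sym).mp h)
      simp only [List.flatMap_cons, hg0, List.nil_append, List.filter_cons, hp]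
      simp only [Bool.false_eq_true, if_false]
      exact ih s

theorem filter_by_narrative_eq (symbols narratives : List String) :
    filter_by_narrative symbols narratives = filter_by_narrative_alt symbols narratives := by
  unfold filter_by_narrative filter_by_narrative_alt
  -- name the pieces
  set wanted := narratives.foldl (fun s n => PySem.Set.update s (pvNARRATIVAS.getD n [])) PySem.Set.empty with hw
  set p : String → Bool := fun sym => PySem.Set.contains wanted (PySem.Str.replace sym "USDT" "") with hp
  set g : String → List String := fun sym =>
    (narratives.filter (fun n => (pvNARRATIVAS.getD n []).contains (PySem.Str.replace sym "USDT" ""))).map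
      (fun _ => sym) with hg
  -- A's inner loop is an append-if fold
  have hinner : ∀ (acc : List String) (sym : String),
      narratives.foldl (fun acc2 n =>
        if (pvNARRATIVAS.getD n []).contains (PySem.Str.replace sym "USDT" "") then acc2 ++ [sym] else acc2) acc
      = acc ++ g sym := by
    intro acc sym
    simpa [hg] using
      PySem.List.foldl_append_if
        (l := narratives)
        (p := fun n => (pvNARRATIVAS.getD n []).contains (PySem.Str.replace sym "USDT" ""))
        (f := fun _ => sym) (acc := acc)
  have houter :
      symbols.foldl (fun acc sym =>
        narratives.foldl (fun acc2 n =>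
          if (pvNARRATIVAS.getD n []).contains (PySem.Str.replace sym "USDT" "") then acc2 ++ [sym] else acc2) acc) []
      = symbols.flatMap g := by
    have := PySem.List.foldl_congr_mem
      (l := symbols)
      (f := fun acc sym =>
        narratives.foldl (fun acc2 n =>
          if (pvNARRATIVAS.getD n []).contains (PySem.Str.replace sym "USDT" "") then acc2 ++ [sym] else acc2) acc)
      (g := fun acc sym => acc ++ g sym) (init := [])
      (fun acc sym _ => hinner acc sym)
    rw [this]
    simpa using PySem.List.foldl_append_eq_flatMap (l := symbols) (g := g) (acc := [])
  rw [houter]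
  -- both sides are foldl Set.add from []
  have hofA : PySem.Set.ofList (symbols.flatMap g) = (symbols.flatMap g).foldl PySem.Set.add [] :=
    PySem.Set.ofList_eq_foldl _
  have hofB : PySem.Set.ofList (symbols.filter p) = (symbols.filter p).foldl PySem.Set.add [] :=
    PySem.Set.ofList_eq_foldl _
  rw [hofA, hofB]
  apply pv_main
  · intro sym y hy
    simp only [hg, List.mem_map] at hy
    exact hy.choose_spec.2.symm
  · intro sym
    constructor
    · intro h
      have : ∃ n ∈ narratives,
          (pvNARRATIVAS.getD n []).contains (PySem.Str.replace sym "USDT" "") = true := by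
        rcases List.exists_mem_of_ne_nil _ h with ⟨y, hy⟩
        simp only [hg, List.mem_map, List.mem_filter] at hy
        rcases hy with ⟨n, ⟨hn, hc⟩, _⟩
        exact ⟨n, hn, hc⟩
      rcases this with ⟨n, hn, hc⟩
      have hb : PySem.Str.replace sym "USDT" "" ∈ pvNARRATIVAS.getD n [] := by
        simpa using hc
      have : PySem.Str.replace sym "USDT" "" ∈ wanted := by
        rw [hw, pv_mem_wanted]
        exact Or.inr ⟨n, hn, hb⟩
      simp only [hp]
      exact (PySem.Set.contains_iff _ _).mpr this
    · intro h
      have hmem : PySem.Str.replace sym "USDT" "" ∈ wanted :=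
        (PySem.Set.contains_iff _ _).mp h
      rw [hw, pv_mem_wanted] at hmem
      rcases hmem with h0 | ⟨n, hn, hb⟩
      · simp [PySem.Set.empty] at h0
      · intro hnil
        have : (narratives.filter
            (fun n => (pvNARRATIVAS.getD n []).contains (PySem.Str.replace sym "USDT" ""))) ≠ [] := by
          intro hfe
          have hc2 : (pvNARRATIVAS.getD n []).contains (PySem.Str.replace sym "USDT" "") = true := by
            simpa using hb
          have : n ∈ narratives.filter
              (fun n => (pvNARRATIVAS.getD n []).contains (PySem.Str.replace sym "USDT" "")) :=
            List.mem_filter.mpr ⟨hn, hc2⟩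
          rw [hfe] at this
          exact absurd this (List.not_mem_nil)
        apply this
        have := congrArg List.length hnil
        simp only [hg, List.length_map, List.length_nil] at this
        exact List.eq_nil_of_length_eq_zero this

-- ===== VERDICT (by name: the statement is the Claim_ definition above) =====
theorem filter_by_narrative_spec : Claim_equal_filter_by_narrative := by
  intro symbols narratives _
  unfold Spec_filter_by_narrative
  exact filter_by_narrative_eq symbols narratives
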